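-- pv_equiv track=rewrite | github.com/Oluaaa/- | 10/5.py | least_frequent_number
-- ===== SOURCE A (Python) =====
-- from collections import Counter
--
-- def least_frequent_number(nums):
--     count = Counter(nums)
--     index = min(count.values())
--     answer = max(nums)
--     for num in count:
--         if count[num] == index:
--             if num < answer:
--                 answer = num
--
--     return answer
-- ===== SOURCE B (Python) =====
-- def least_frequent_number(nums):
--     s = sorted(nums)
--     if not s:
--         raise ValueError("least_frequent_number() arg is an empty sequence")
--     best_val = s[0]
--     best_len = len(s) + 1      # sentinel: longer than any run
--     cur_val = s[0]
--     cur_len = 0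
--     for x in s:
--         if x == cur_val:
--             cur_len += 1
--         else:
--             if cur_len < best_len:
--                 best_val, best_len = cur_val, cur_len
--             cur_val, cur_len = x, 1
--     if cur_len < best_len:
--         best_val = cur_val
--     return best_val
-- ===== Notes on version B (the rewrite author's own statement) =====
-- stated objective: alternative
-- what changed: Replaces the Counter/min-of-frequencies/key-scan with a sort of the list followed by a single run-length scan that keeps the first (hence smallest) value whose run is strictly shortest.
import Mathlib
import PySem

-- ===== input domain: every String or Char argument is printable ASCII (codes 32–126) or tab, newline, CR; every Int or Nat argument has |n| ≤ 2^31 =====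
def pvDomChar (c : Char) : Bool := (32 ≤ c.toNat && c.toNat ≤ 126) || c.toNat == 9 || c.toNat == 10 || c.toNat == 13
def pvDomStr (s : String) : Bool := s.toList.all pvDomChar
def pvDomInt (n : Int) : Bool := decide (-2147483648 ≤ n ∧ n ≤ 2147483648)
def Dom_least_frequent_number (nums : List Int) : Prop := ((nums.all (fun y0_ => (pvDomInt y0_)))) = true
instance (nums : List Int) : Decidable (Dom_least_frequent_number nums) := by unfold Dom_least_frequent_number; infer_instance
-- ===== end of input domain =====

-- B replaces A's Counter + min-of-frequencies + key scan by sorting the list and doing one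
-- run-length scan keeping the first (= smallest) value with the strictly shortest run ("alternative").

-- ===== PORT A =====
def least_frequent_number (nums : List Int) : Int :=
  let count := PySem.Dict.counter nums
  match PySem.List.min? count.values (fun v => v) with
  | none => 0        -- min() of empty values: ValueError; excluded by Pre_
  | some index =>
    match PySem.List.max? nums (fun v => v) with
    | none => 0      -- max() of empty: ValueError; excluded by Pre_
    | some answer0 =>
      -- for num in count: if count[num] == index and num < answer: answer = num
      -- (count[num] with num a key of count: getD is exact here, no KeyError possible)
      count.keys.foldl
        (fun answer num =>
          if count.getD num 0 = index then
            if num < answer then num else answer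
          else answer)
        answer0

-- ===== PORT B =====
-- state (best_val, best_len, cur_val, cur_len), exactly Source B's loop body
def lfnStep : (Int × Int × Int × Int) → Int → (Int × Int × Int × Int)
  | (bv, bl, cv, cl), x =>
    if x = cv then (bv, bl, cv, cl + 1)
    else if cl < bl then (cv, cl, x, 1)
    else (bv, bl, x, 1)

def least_frequent_number_alt (nums : List Int) : Int :=
  let s := PySem.List.sorted nums (fun v => v) false
  match s with
  | [] => 0          -- Source B raises ValueError on empty input; excluded by Pre_
  | s0 :: _ =>
    match s.foldl lfnStep (s0, (s.length : Int) + 1, s0, 0) with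
    | (bv, bl, cv, cl) => if cl < bl then cv else bv

-- ===== PRECONDITION & SPEC =====
-- Pre_ excludes only the empty list, on which both A and B raise ValueError.
def Pre_least_frequent_number (nums : List Int) : Prop := nums ≠ []
instance (nums : List Int) : Decidable (Pre_least_frequent_number nums) := by
  unfold Pre_least_frequent_number; infer_instance
def pvWitness_least_frequent_number : List Int := [1, 2, 2]

def Spec_least_frequent_number (nums : List Int) (out : Int) : Prop := out = least_frequent_number_alt nums
instance (nums : List Int) (out : Int) : Decidable (Spec_least_frequent_number nums out) := by unfold Spec_least_frequent_number; infer_instance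

-- ===== CLAIM (what is proved, stated in full; the proofs are below) =====
def Claim_equal_least_frequent_number : Prop := ∀ (nums : List Int), Dom_least_frequent_number nums → Pre_least_frequent_number nums → Spec_least_frequent_number nums (least_frequent_number nums)

-- ===== LEMMAS AND PROOFS =====

-- run decomposition of a (sorted) list: (value, run length) pairs
def pvRuns : List Int → List (Int × Int)
  | [] => []
  | x :: t => (x, 1 + (t.count x : Int)) :: pvRuns (t.filter (· ≠ x))
  termination_by l => l.length
  decreasing_by simp; exact le_trans (List.length_filter_le _ _) (by simp)

def pvStep2 (st : Int × Int) (p : Int × Int) : Int × Int := if p.2 < st.2 then p else st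

def pvFin : (Int × Int × Int × Int) → Int
  | (bv, bl, cv, cl) => if cl < bl then cv else bv

lemma pv_fold_run : ∀ (s : List Int) (bv bl cv cl : Int),
    s.Pairwise (· ≤ ·) → (∀ y ∈ s, cv ≤ y) →
    pvFin (s.foldl lfnStep (bv, bl, cv, cl))
    = (((cv, cl + (s.count cv : Int)) :: pvRuns (s.filter (· ≠ cv))).foldl pvStep2 (bv, bl)).1 := by
  intro s
  induction s with
  | nil =>
    intro bv bl cv cl _ _
    simp only [List.foldl_nil, List.count_nil, List.filter_nil, pvRuns, pvFin,
      List.foldl_cons, pvStep2, Nat.cast_zero, add_zero]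
    split_ifs <;> rfl
  | cons x t ih =>
    intro bv bl cv cl hpw hle
    have hpc := List.pairwise_cons.1 hpw
    by_cases hx : x = cv
    · have hstep : lfnStep (bv, bl, cv, cl) x = (bv, bl, cv, cl + 1) := by
        simp [lfnStep, hx]
      rw [List.foldl_cons, hstep]
      have hlet : ∀ y ∈ t, cv ≤ y := fun y hy => hle y (List.mem_cons_of_mem _ hy)
      rw [ih bv bl cv (cl + 1) hpc.2 hlet]
      have hcnt : ((x :: t).count cv : Int) = (t.count cv : Int) + 1 := by
        rw [hx, List.count_cons_self]; push_cast; ring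
      have hfil : (x :: t).filter (· ≠ cv) = t.filter (· ≠ cv) := by
        rw [List.filter_cons]
        simp [hx]
      rw [hcnt, hfil]
      have : cl + ((t.count cv : Int) + 1) = cl + 1 + (t.count cv : Int) := by ring
      rw [this]
    · -- x ≠ cv, so cv < every element of x :: t
      have hcvx : cv < x := lt_of_le_of_ne (hle x List.mem_cons_self) (fun h => hx h.symm)
      have hallgt : ∀ y ∈ x :: t, cv < y := by
        intro y hy
        rcases List.mem_cons.1 hy with h | h
        · exact h ▸ hcvx
        · exact lt_of_lt_of_le hcvx (hpc.1 y h)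
      have hnotmem : cv ∉ x :: t := fun h => lt_irrefl cv (hallgt cv h)
      have hcnt : ((x :: t).count cv : Int) = 0 := by
        rw [List.count_eq_zero.2 hnotmem]; rfl
      have hfil : (x :: t).filter (· ≠ cv) = x :: t := by
        rw [List.filter_eq_self]
        intro y hy
        simp only [ne_eq, decide_eq_true_eq]
        exact fun h => lt_irrefl cv (h ▸ hallgt y hy)
      rw [hcnt, hfil, pvRuns]
      have hstep : lfnStep (bv, bl, cv, cl) x
          = if cl < bl then (cv, cl, x, (1 : Int)) else (bv, bl, x, (1 : Int)) := by
        simp [lfnStep, hx]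
      have hlet : ∀ y ∈ t, x ≤ y := hpc.1
      by_cases hcb : cl < bl
      · rw [List.foldl_cons, hstep, if_pos hcb, ih cv cl x 1 hpc.2 hlet]
        simp only [List.foldl_cons]
        have : pvStep2 (bv, bl) (cv, cl + 0) = (cv, cl) := by
          simp [pvStep2, hcb]
        rw [this]
      · rw [List.foldl_cons, hstep, if_neg hcb, ih bv bl x 1 hpc.2 hlet]
        simp only [List.foldl_cons]
        have : pvStep2 (bv, bl) (cv, cl + 0) = (bv, bl) := by
          simp [pvStep2, hcb]
        rw [this]

lemma pv_minfold_le : ∀ (r : List (Int × Int)) (a : Int),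
    r.foldl (fun x q => min x q.2) a ≤ a := by
  intro r
  induction r with
  | nil => intro a; simp
  | cons q t ih => intro a; exact le_trans (ih _) (min_le_left _ _)

lemma pv_gp_find : ∀ (r : List (Int × Int)) (st : Int × Int),
    (st :: r).find? (fun p => p.2 == r.foldl (fun a q => min a q.2) st.2)
      = some (r.foldl pvStep2 st) := by
  intro r
  induction r with
  | nil => intro st; simp
  | cons p r' ih =>
    intro st
    have hsnd : (pvStep2 st p).2 = min st.2 p.2 := by
      unfold pvStep2
      rw [Int.min_def]
      split_ifs <;> first | rfl | omega
    have hkey : (p :: r').foldl (fun a q => min a q.2) st.2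
        = r'.foldl (fun a q => min a q.2) (pvStep2 st p).2 := by
      rw [hsnd]; rfl
    set mc := r'.foldl (fun a q => min a q.2) (pvStep2 st p).2 with hmcdef
    have hmcle : mc ≤ min st.2 p.2 := by
      rw [hmcdef, hsnd]
      exact pv_minfold_le _ _
    have ihp := ih (pvStep2 st p)
    rw [← hmcdef] at ihp
    rw [hkey, List.foldl_cons]
    by_cases hp2 : p.2 < st.2
    · have hstp : pvStep2 st p = p := by simp [pvStep2, hp2]
      have hstf : ¬ ((fun q : Int × Int => q.2 == mc) st = true) := by
        have h1 : mc ≤ p.2 := le_trans hmcle (min_le_right _ _)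
        simp only [beq_iff_eq]
        omega
      rw [List.find?_cons_of_neg (p := fun q : Int × Int => q.2 == mc) hstf, hstp]
      rw [hstp] at ihp
      exact ihp
    · have hstp : pvStep2 st p = st := by simp [pvStep2, hp2]
      rw [hstp] at ihp
      rw [hstp]
      have h1 : mc ≤ st.2 := le_trans hmcle (min_le_left _ _)
      by_cases hst : st.2 = mc
      · have hstt : ((fun q : Int × Int => q.2 == mc) st = true) := by
          simp only [beq_iff_eq]; exact hst
        rw [List.find?_cons_of_pos (p := fun q : Int × Int => q.2 == mc) hstt]
        rw [List.find?_cons_of_pos (p := fun q : Int × Int => q.2 == mc) hstt] at ihp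
        exact ihp
      · have hstf : ¬ ((fun q : Int × Int => q.2 == mc) st = true) := by
          simp only [beq_iff_eq]; exact hst
        have h2 : st.2 ≤ p.2 := by omega
        have hpf : ¬ ((fun q : Int × Int => q.2 == mc) p = true) := by
          simp only [beq_iff_eq]
          omega
        rw [List.find?_cons_of_neg (p := fun q : Int × Int => q.2 == mc) hstf, List.find?_cons_of_neg (p := fun q : Int × Int => q.2 == mc) hpf]
        rw [List.find?_cons_of_neg (p := fun q : Int × Int => q.2 == mc) hstf] at ihp
        exact ihp

lemma pv_mem_runs_aux : ∀ (n : Nat) (s : List Int), s.length ≤ n →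
    ∀ p ∈ pvRuns s, p.1 ∈ s ∧ p.2 = (s.count p.1 : Int) := by
  intro n
  induction n with
  | zero =>
    intro s hs p hp
    rw [List.length_eq_zero_iff.1 (Nat.le_zero.1 hs)] at hp
    simp [pvRuns] at hp
  | succ n ih =>
    intro s hs p hp
    cases s with
    | nil => simp [pvRuns] at hp
    | cons x t =>
      rw [pvRuns] at hp
      rcases List.mem_cons.1 hp with h | h
      · subst h
        refine ⟨List.mem_cons_self, ?_⟩
        simp only [List.count_cons_self]
        push_cast
        ring
      · have hlen : (t.filter (· ≠ x)).length ≤ n := by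
          have h1 := List.length_filter_le (fun y => decide (y ≠ x)) t
          simp only [List.length_cons] at hs
          omega
        obtain ⟨h1, h2⟩ := ih _ hlen p h
        have hmf := List.mem_filter.1 h1
        have hne : p.1 ≠ x := by simpa using hmf.2
        refine ⟨List.mem_cons_of_mem _ hmf.1, ?_⟩
        rw [h2]
        have hc : (t.filter (· ≠ x)).count p.1 = t.count p.1 := by
          rw [List.count_filter]
          simp [hne]
        rw [hc]
        simp [Ne.symm hne]

lemma pv_mem_runs (s : List Int) : ∀ p ∈ pvRuns s, p.1 ∈ s ∧ p.2 = (s.count p.1 : Int) :=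
  pv_mem_runs_aux s.length s le_rfl

lemma pv_runs_mem_of_mem_aux : ∀ (n : Nat) (s : List Int), s.length ≤ n →
    ∀ v ∈ s, (v, (s.count v : Int)) ∈ pvRuns s := by
  intro n
  induction n with
  | zero =>
    intro s hs v hv
    rw [List.length_eq_zero_iff.1 (Nat.le_zero.1 hs)] at hv
    simp at hv
  | succ n ih =>
    intro s hs v hv
    cases s with
    | nil => simp at hv
    | cons x t =>
      rw [pvRuns]
      by_cases hvx : v = x
      · subst hvx
        rw [List.count_cons_self]
        have : ((t.count v + 1 : Nat) : Int) = 1 + (t.count v : Int) := by push_cast; ring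
        rw [this]
        exact List.mem_cons_self
      · have hvt : v ∈ t := by
          rcases List.mem_cons.1 hv with h | h
          · exact absurd h hvx
          · exact h
        have hvf : v ∈ t.filter (· ≠ x) := List.mem_filter.2 ⟨hvt, by simp only [ne_eq, decide_eq_true_eq]; exact hvx⟩
        have hlen : (t.filter (· ≠ x)).length ≤ n := by
          have h1 := List.length_filter_le (fun y => decide (y ≠ x)) t
          simp only [List.length_cons] at hs
          omega
        have hmem := ih _ hlen v hvf
        have hc : (t.filter (· ≠ x)).count v = (x :: t).count v := by
          have h1 : (t.filter (· ≠ x)).count v = t.count v := by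
            rw [List.count_filter]
            simp [hvx]
          have hxv : ¬ x = v := fun h => hvx h.symm
          rw [h1, List.count_cons]
          simp [hxv]
        rw [hc] at hmem
        exact List.mem_cons_of_mem _ hmem

lemma pv_runs_mem_of_mem (s : List Int) : ∀ v ∈ s, (v, (s.count v : Int)) ∈ pvRuns s :=
  pv_runs_mem_of_mem_aux s.length s le_rfl

lemma pv_runs_fst_lt_aux : ∀ (n : Nat) (s : List Int), s.length ≤ n → s.Pairwise (· ≤ ·) →
    ((pvRuns s).map Prod.fst).Pairwise (· < ·) := by
  intro n
  induction n with
  | zero =>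
    intro s hs _
    rw [List.length_eq_zero_iff.1 (Nat.le_zero.1 hs)]
    simp [pvRuns]
  | succ n ih =>
    intro s hs hp
    cases s with
    | nil => simp [pvRuns]
    | cons x t =>
      rw [pvRuns]
      simp only [List.map_cons]
      rw [List.pairwise_cons]
      have hpc := List.pairwise_cons.1 hp
      have hlen : (t.filter (· ≠ x)).length ≤ n := by
        have h1 := List.length_filter_le (fun y => decide (y ≠ x)) t
        simp only [List.length_cons] at hs
        omega
      constructor
      · intro v hv
        obtain ⟨p, hpmem, rfl⟩ := List.mem_map.1 hv
        have h1 := (pv_mem_runs _ p hpmem).1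
        have hmf := List.mem_filter.1 h1
        have hxle : x ≤ p.1 := hpc.1 _ hmf.1
        have hne : p.1 ≠ x := by simpa using hmf.2
        omega
      · exact ih _ hlen (hpc.2.sublist (List.filter_sublist))

lemma pv_runs_fst_lt (s : List Int) (h : s.Pairwise (· ≤ ·)) :
    ((pvRuns s).map Prod.fst).Pairwise (· < ·) :=
  pv_runs_fst_lt_aux s.length s le_rfl h

lemma pv_find_min : ∀ (r : List (Int × Int)) (m : Int) (res : Int × Int),
    ((r.map Prod.fst).Pairwise (· < ·)) →
    r.find? (fun p => p.2 == m) = some res →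
    res.2 = m ∧ res ∈ r ∧ ∀ p ∈ r, p.2 = m → res.1 ≤ p.1 := by
  intro r
  induction r with
  | nil => intro m res _ h; simp at h
  | cons q t ih =>
    intro m res hpw hf
    rw [List.map_cons, List.pairwise_cons] at hpw
    by_cases hq : q.2 = m
    · rw [List.find?_cons_of_pos (by simpa using hq)] at hf
      obtain rfl : q = res := by injection hf
      refine ⟨hq, List.mem_cons_self, ?_⟩
      intro p hp _
      rcases List.mem_cons.1 hp with h | h
      · rw [h]
      · have : q.1 < p.1 := hpw.1 _ (List.mem_map.2 ⟨p, h, rfl⟩)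
        omega
    · rw [List.find?_cons_of_neg (by simpa using hq)] at hf
      obtain ⟨h1, h2, h3⟩ := ih m res hpw.2 hf
      refine ⟨h1, List.mem_cons_of_mem _ h2, ?_⟩
      intro p hp hpm
      rcases List.mem_cons.1 hp with h | h
      · exact absurd (h ▸ hpm) hq
      · exact h3 p h hpm

lemma pv_foldl_if_filter (c : Int → Int) (i : Int) : ∀ (L : List Int) (a : Int),
    L.foldl (fun ans k => if c k = i then (if k < ans then k else ans) else ans) a
      = (L.filter (fun k => decide (c k = i))).foldl min a := by
  intro L
  induction L with
  | nil => intro a; simp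
  | cons k t ih =>
    intro a
    by_cases h : c k = i
    · simp only [List.foldl_cons, List.filter_cons, h, if_pos, decide_true]
      rw [ih]
      congr 1
      rw [Int.min_def]
      split_ifs <;> omega
    · simp only [List.foldl_cons, List.filter_cons, h, if_false, decide_false]
      exact ih a

lemma pv_min?_eq_of_same_mem (l1 l2 : List Int) (hm : ∀ x, x ∈ l1 ↔ x ∈ l2)
    (m1 m2 : Int)
    (h1 : PySem.List.min? l1 (fun v => v) = some m1)
    (h2 : PySem.List.min? l2 (fun v => v) = some m2) : m1 = m2 := by
  have hm1 := PySem.List.min?_mem h1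
  have hm2 := PySem.List.min?_mem h2
  have hi1 := PySem.List.min?_isMin h1
  have hi2 := PySem.List.min?_isMin h2
  exact le_antisymm (hi1 _ ((hm _).2 hm2)) (hi2 _ ((hm _).1 hm1))

lemma pv_main (nums : List Int) (hpre : nums ≠ []) :
    least_frequent_number nums = least_frequent_number_alt nums := by
  classical
  -- B side: sorted list, destructed
  obtain ⟨s0, t, hsl⟩ : ∃ s0 t, PySem.List.sorted nums (fun v => v) false = s0 :: t := by
    cases h : PySem.List.sorted nums (fun v => v) false with
    | nil => exact absurd ((PySem.List.sorted_eq_nil_iff nums _ false).1 h) hpre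
    | cons a b => exact ⟨a, b, rfl⟩
  have hperm : (s0 :: t).Perm nums := hsl ▸ PySem.List.sorted_perm nums (fun v => v) false
  have hpw : (s0 :: t).Pairwise (· ≤ ·) := by
    have := PySem.List.sorted_pairwise nums (fun v => v)
    rw [hsl] at this
    exact this
  have hle0 : ∀ y ∈ s0 :: t, s0 ≤ y := by
    intro y hy
    rcases List.mem_cons.1 hy with h | h
    · exact le_of_eq h.symm
    · exact (List.pairwise_cons.1 hpw).1 y h
  -- abbreviations
  set bl : Int := ((s0 :: t).length : Int) + 1 with hbl
  set r := pvRuns (s0 :: t) with hr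
  -- B = fold over runs
  have haltB : least_frequent_number_alt nums = (r.foldl pvStep2 (s0, bl)).1 := by
    unfold least_frequent_number_alt
    rw [hsl]
    have hfr := pv_fold_run (s0 :: t) s0 bl s0 0 hpw hle0
    have hlist : ((s0, 0 + (((s0 :: t).count s0 : Nat) : Int)) :: pvRuns ((s0 :: t).filter (· ≠ s0)))
        = pvRuns (s0 :: t) := by
      rw [pvRuns]
      have h1 : (0 : Int) + (((s0 :: t).count s0 : Nat) : Int) = 1 + ((t.count s0 : Nat) : Int) := by
        rw [List.count_cons_self]; push_cast; ring
      have h2 : (s0 :: t).filter (· ≠ s0) = t.filter (· ≠ s0) := by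
        rw [List.filter_cons]; simp
      rw [h1, h2]
    rw [hlist] at hfr
    exact hfr
  -- find? characterisation of the B fold
  set mc := r.foldl (fun a q => min a q.2) bl with hmc
  have hfind0 := pv_gp_find r (s0, bl)
  -- the sentinel is never the minimum: every run length is ≤ length < bl
  have hrcons : r = (s0, 1 + ((t.count s0 : Nat) : Int)) :: pvRuns (t.filter (· ≠ s0)) := by
    rw [hr, pvRuns]
  set c1 : Int := 1 + ((t.count s0 : Nat) : Int) with hc1
  have hc1le : c1 ≤ ((s0 :: t).length : Int) := by
    have := List.count_le_length (l := t) (a := s0)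
    simp only [List.length_cons]
    push_cast
    omega
  have hmcmap : mc = (r.map Prod.snd).foldl min bl := by
    rw [hmc, List.foldl_map]
  have hminB : PySem.List.min? (r.map Prod.snd) (fun y => y) = some mc := by
    rw [hrcons, List.map_cons]
    rw [PySem.List.min?_id_cons]
    congr 1
    rw [hmcmap, hrcons, List.map_cons, List.foldl_cons]
    have : min bl c1 = c1 := min_eq_right (by omega)
    rw [this]
  have hmcle_c1 : mc ≤ c1 := by
    refine PySem.List.min?_isMin hminB c1 ?_
    rw [hrcons, List.map_cons]
    exact List.mem_cons_self
  have hsent : ¬ ((fun p : Int × Int => p.2 == mc) (s0, bl) = true) := by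
    simp only [beq_iff_eq]
    omega
  set res := r.foldl pvStep2 (s0, bl) with hres
  have hfind : r.find? (fun p => p.2 == mc) = some res := by
    have := hfind0
    rw [List.find?_cons_of_neg (p := fun q : Int × Int => q.2 == mc) hsent] at this
    exact this
  have hfm := pv_find_min r mc res (pv_runs_fst_lt (s0 :: t) hpw) hfind
  -- A side
  have hKne : PySem.Set.ofList nums ≠ [] := by
    obtain ⟨n0, hn0⟩ := List.exists_mem_of_ne_nil nums hpre
    exact List.ne_nil_of_mem ((PySem.Set.mem_ofList nums n0).2 hn0)
  have hvals : (PySem.Dict.counter nums).values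
      = (PySem.Set.ofList nums).map (fun k => ((nums.count k : Nat) : Int)) := by
    rw [PySem.Dict.values_eq_map_keys (PySem.Dict.counter nums) (PySem.Dict.nodup_keys_counter nums) 0]
    rw [PySem.Dict.keys_counter]
    exact List.map_congr_left (fun k _ => PySem.Dict.getD_counter nums k)
  obtain ⟨index, hminA⟩ : ∃ i, PySem.List.min? (PySem.Dict.counter nums).values (fun v => v) = some i := by
    cases h : PySem.List.min? (PySem.Dict.counter nums).values (fun v => v) with
    | none =>
      rw [PySem.List.min?_eq_none_iff, hvals, List.map_eq_nil_iff] at h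
      exact absurd h hKne
    | some i => exact ⟨i, rfl⟩
  obtain ⟨a0, hmaxA⟩ : ∃ a, PySem.List.max? nums (fun v => v) = some a := by
    cases h : PySem.List.max? nums (fun v => v) with
    | none => exact absurd ((PySem.List.max?_eq_none_iff nums _).1 h) hpre
    | some a => exact ⟨a, rfl⟩
  have hA : least_frequent_number nums
      = ((PySem.Set.ofList nums).filter
          (fun k => decide (((nums.count k : Nat) : Int) = index))).foldl min a0 := by
    have hz : least_frequent_number nums =
        (match PySem.List.min? (PySem.Dict.counter nums).values (fun v => v) with
         | none => (0 : Int)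
         | some index =>
           match PySem.List.max? nums (fun v => v) with
           | none => (0 : Int)
           | some answer0 =>
             (PySem.Dict.counter nums).keys.foldl
               (fun answer num =>
                 if (PySem.Dict.counter nums).getD num 0 = index then
                   if num < answer then num else answer
                 else answer) answer0) := rfl
    rw [hz, hminA, hmaxA, PySem.Dict.keys_counter]
    rw [← pv_foldl_if_filter (fun k => ((nums.count k : Nat) : Int)) index]
    apply PySem.List.foldl_congr_mem
    intro a x _
    rw [PySem.Dict.getD_counter]
  -- index = mc : both are min? of value-lists with the same members
  have hmemiff : ∀ x, x ∈ (PySem.Dict.counter nums).values ↔ x ∈ r.map Prod.snd := by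
    intro x
    rw [hvals]
    constructor
    · intro hx
      obtain ⟨k, hk, rfl⟩ := List.mem_map.1 hx
      have hks : k ∈ s0 :: t := hperm.mem_iff.2 ((PySem.Set.mem_ofList nums k).1 hk)
      have := pv_runs_mem_of_mem (s0 :: t) k hks
      refine List.mem_map.2 ⟨(k, (((s0 :: t).count k : Nat) : Int)), this, ?_⟩
      simp only
      congr 1
      exact (hperm.count_eq k).symm ▸ rfl
    · intro hx
      obtain ⟨p, hp, rfl⟩ := List.mem_map.1 hx
      obtain ⟨hp1, hp2⟩ := pv_mem_runs (s0 :: t) p hp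
      refine List.mem_map.2 ⟨p.1, (PySem.Set.mem_ofList nums p.1).2 (hperm.mem_iff.1 hp1), ?_⟩
      rw [hp2, hperm.count_eq]
  have hidx : index = mc := pv_min?_eq_of_same_mem _ _ hmemiff _ _ hminA hminB
  -- put the two sides together
  rw [hA, haltB]
  have hresmem := hfm.2.1
  obtain ⟨hres1, hres2⟩ := pv_mem_runs (s0 :: t) res hresmem
  have hrescnt : res.2 = ((nums.count res.1 : Nat) : Int) := by
    rw [hres2, hperm.count_eq]
  have hresP : res.1 ∈ (PySem.Set.ofList nums).filter
      (fun k => decide (((nums.count k : Nat) : Int) = index)) := by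
    refine List.mem_filter.2 ⟨(PySem.Set.mem_ofList nums res.1).2 (hperm.mem_iff.1 hres1), ?_⟩
    simp only [decide_eq_true_eq]
    rw [← hrescnt, hfm.1, hidx]
  have hAle : ((PySem.Set.ofList nums).filter
      (fun k => decide (((nums.count k : Nat) : Int) = index))).foldl min a0 ≤ res.1 :=
    (PySem.List.foldl_min_le _ a0).2 res.1 hresP
  rcases PySem.List.foldl_min_mem ((PySem.Set.ofList nums).filter
      (fun k => decide (((nums.count k : Nat) : Int) = index))) a0 with heq | hmem
  · -- the fold never improved on a0 = max(nums); then res.1 = a0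
    have hresle : res.1 ≤ a0 := PySem.List.max?_isMax hmaxA res.1 (hperm.mem_iff.1 hres1)
    omega
  · -- the fold result is itself a candidate; minimality of res.1 among candidates
    set Af := ((PySem.Set.ofList nums).filter
      (fun k => decide (((nums.count k : Nat) : Int) = index))).foldl min a0 with hAf
    obtain ⟨hAfK, hAfP⟩ := List.mem_filter.1 hmem
    have hAfs : Af ∈ s0 :: t := hperm.mem_iff.2 ((PySem.Set.mem_ofList nums Af).1 hAfK)
    have hAfr := pv_runs_mem_of_mem (s0 :: t) Af hAfs
    have hAfsnd : (((s0 :: t).count Af : Nat) : Int) = mc := by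
      rw [hperm.count_eq, ← hidx]
      simpa using hAfP
    have := hfm.2.2 (Af, (((s0 :: t).count Af : Nat) : Int)) hAfr hAfsnd
    simp only at this
    omega

-- ===== VERDICT (by name: the statement is the Claim_ definition above) =====
theorem least_frequent_number_spec : Claim_equal_least_frequent_number := by
  unfold Claim_equal_least_frequent_number
  intro nums _ hpre
  unfold Spec_least_frequent_number
  exact pv_main nums hpre
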